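-- pv_equiv track=rewrite | github.com/pauloabraao/lex_analyzer | analyzer/analisador.py | alphadigit
-- ===== SOURCE A (Python) =====
-- def alphadigit(exp):
--     i = 0
--     while i < len(exp):
--         if (exp[i] >= 'a' and exp[i] <= 'z') or (exp[i] >= 'A' and exp[i] <= 'Z') or (exp[i] >= '0' and exp[i] <= '9'):
--             i += 1
--         else:
--             return False
--     return True
-- ===== SOURCE B (Python) =====
-- ALNUM = "abcdefghijklmnopqrstuvwxyzABCDEFGHIJKLMNOPQRSTUVWXYZ0123456789"
--
-- def alphadigit(exp):
--     # divide and conquer: split the string in half and recurse on each half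
--     if len(exp) <= 1:
--         return len(exp) == 0 or exp[0] in ALNUM
--     mid = len(exp) // 2
--     return alphadigit(exp[:mid]) and alphadigit(exp[mid:])
-- ===== Notes on version B (the rewrite author's own statement) =====
-- stated objective: alternative
-- what changed: Replaced the index-based while loop with early return by a divide-and-conquer binary recursion that splits the string in half and checks each half, with a one-character membership test at the leaves.
import Mathlib
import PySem

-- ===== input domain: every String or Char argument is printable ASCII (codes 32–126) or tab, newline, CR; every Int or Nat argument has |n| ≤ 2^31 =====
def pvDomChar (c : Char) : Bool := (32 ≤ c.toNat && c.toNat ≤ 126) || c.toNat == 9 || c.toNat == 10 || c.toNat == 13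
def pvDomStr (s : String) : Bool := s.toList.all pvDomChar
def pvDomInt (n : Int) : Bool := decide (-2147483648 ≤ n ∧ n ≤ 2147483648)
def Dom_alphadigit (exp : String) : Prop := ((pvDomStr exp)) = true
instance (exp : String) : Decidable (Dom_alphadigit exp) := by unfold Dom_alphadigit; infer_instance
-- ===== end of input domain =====

-- B replaces A's index-based while loop (early return) by a divide-and-conquer binary
-- recursion on string halves with a one-character membership leaf test (objective: alternative).

set_option maxRecDepth 10000

-- ===== PORT A =====
-- the while loop over index i with early 'return False'
def alphadigitGo (cs : List Char) (i : Nat) : Bool :=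
  if h : i < cs.length then
    let c := cs[i]
    if (('a' ≤ c ∧ c ≤ 'z') ∨ ('A' ≤ c ∧ c ≤ 'Z') ∨ ('0' ≤ c ∧ c ≤ '9')) then
      alphadigitGo cs (i + 1)
    else
      false
  else
    true
termination_by cs.length - i

def alphadigit (exp : String) : Bool := alphadigitGo exp.toList 0

-- ===== PORT B =====
-- ALNUM = the 62 ASCII alphanumerics
def pvAlnum : List Char :=
  "abcdefghijklmnopqrstuvwxyzABCDEFGHIJKLMNOPQRSTUVWXYZ0123456789".toList

-- divide and conquer on the list of characters; exp[:mid] / exp[mid:] with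
-- 0 ≤ mid ≤ len are exactly List.take mid / List.drop mid
def alphadigitAltGo (cs : List Char) : Bool :=
  if cs.length ≤ 1 then
    (decide (cs.length = 0)) ||
      (match cs with
       | [] => false
       | c :: _ => pvAlnum.contains c)   -- exp[0] in ALNUM (only reached when nonempty)
  else
    let mid := cs.length / 2
    alphadigitAltGo (cs.take mid) && alphadigitAltGo (cs.drop mid)
termination_by cs.length
decreasing_by
  · simp only [List.length_take]; omega
  · simp only [List.length_drop]; omega

def alphadigit_alt (exp : String) : Bool := alphadigitAltGo exp.toList

-- ===== PRECONDITION & SPEC =====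
def Spec_alphadigit (exp : String) (out : Bool) : Prop := out = alphadigit_alt exp
instance (exp : String) (out : Bool) : Decidable (Spec_alphadigit exp out) := by unfold Spec_alphadigit; infer_instance

-- ===== CLAIM (what is proved, stated in full; the proofs are below) =====
def Claim_equal_alphadigit : Prop := ∀ (exp : String), Dom_alphadigit exp → Spec_alphadigit exp (alphadigit exp)

-- ===== LEMMAS AND PROOFS =====

-- the per-character test of A, as a Bool predicate
def pvOk (c : Char) : Bool :=
  decide (('a' ≤ c ∧ c ≤ 'z') ∨ ('A' ≤ c ∧ c ≤ 'Z') ∨ ('0' ≤ c ∧ c ≤ '9'))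

theorem pvAlnum_contains (c : Char) : pvAlnum.contains c = pvOk c := by
  have h : pvAlnum = ['a', 'b', 'c', 'd', 'e', 'f', 'g', 'h', 'i', 'j', 'k', 'l', 'm',
      'n', 'o', 'p', 'q', 'r', 's', 't', 'u', 'v', 'w', 'x', 'y', 'z', 'A', 'B', 'C', 'D',
      'E', 'F', 'G', 'H', 'I', 'J', 'K', 'L', 'M', 'N', 'O', 'P', 'Q', 'R', 'S', 'T', 'U',
      'V', 'W', 'X', 'Y', 'Z', '0', '1', '2', '3', '4', '5', '6', '7', '8', '9'] := by decide
  rw [h]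
  simp only [pvOk, List.contains_eq_mem, List.mem_cons,
    List.not_mem_nil, or_false, decide_eq_decide, Char.ext_iff, UInt32.ext_iff,
    Char.le_def, UInt32.le_iff_toNat_le]
  have hv : ∀ d : Char, d.val.toNat = d.toNat := fun _ => rfl
  simp only [hv, Char.reduceToNat]
  omega

theorem alphadigitGo_eq (cs : List Char) (i : Nat) :
    alphadigitGo cs i = (cs.drop i).all pvOk := by
  rw [alphadigitGo]
  split
  · rename_i h
    rw [List.drop_eq_getElem_cons h, List.all_cons, alphadigitGo_eq cs (i+1)]
    dsimp only
    split_ifs with hc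
    · simp [pvOk, hc]
    · simp [pvOk, hc]
  · rename_i h
    rw [List.drop_eq_nil_of_le (by omega)]; simp
termination_by cs.length - i

theorem alphadigitAltGo_eq (cs : List Char) :
    alphadigitAltGo cs = cs.all pvOk := by
  rw [alphadigitAltGo.eq_def]
  split
  · rename_i h
    match cs, h with
    | [], _ => simp
    | [c], _ => simpa using pvAlnum_contains c
  · rename_i h
    dsimp only
    rw [alphadigitAltGo_eq, alphadigitAltGo_eq]
    conv_rhs => rw [← List.take_append_drop (cs.length / 2) cs]
    rw [List.all_append]
termination_by cs.length
decreasing_by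
  · simp only [List.length_take]; omega
  · simp only [List.length_drop]; omega

-- ===== VERDICT (by name: the statement is the Claim_ definition above) =====
theorem alphadigit_spec : Claim_equal_alphadigit := by
  intro exp _
  unfold Spec_alphadigit alphadigit alphadigit_alt
  rw [alphadigitAltGo_eq, alphadigitGo_eq]
  simp
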